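-- pv_equiv track=rewrite | github.com/DiegoLagosBesoain/Algoritms-and-Competitive_programing | Grafos_backtraking_binarysearch/bishops.py | verificar_alfil
-- ===== SOURCE A (Python) =====
-- def verificar_alfil(matriz, i, j, n):
--     for k in range(n):
--         # SOLO diagonales
--         if i+k < n and j+k < n and matriz[i+k][j+k] == 1:
--             return False
--         if i-k >= 0 and j-k >= 0 and matriz[i-k][j-k] == 1:
--             return False
--         if i+k < n and j-k >= 0 and matriz[i+k][j-k] == 1:
--             return False
--         if i-k >= 0 and j+k < n and matriz[i-k][j+k] == 1:
--             return False
--     return True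
-- ===== SOURCE B (Python) =====
-- def verificar_alfil(matriz, i, j, n):
--     for a in range(n):
--         for b in range(n):
--             if abs(a - i) == abs(b - j) and matriz[a][b] == 1:
--                 return False
--     return True
-- ===== Notes on version B (the rewrite author's own statement) =====
-- stated objective: simpler
-- what changed: Replaces A's four guarded directional ray-walks (one index k per step, eight bounds checks) by a plain full-board scan that flags any cell with abs(a-i)==abs(b-j), needing no bounds guards at all.
-- outside the precondition, e.g. on verificar_alfil([[1, 0], [0, 0]], -2, 0, 2): A returns False, B returns True
import Mathlib
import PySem

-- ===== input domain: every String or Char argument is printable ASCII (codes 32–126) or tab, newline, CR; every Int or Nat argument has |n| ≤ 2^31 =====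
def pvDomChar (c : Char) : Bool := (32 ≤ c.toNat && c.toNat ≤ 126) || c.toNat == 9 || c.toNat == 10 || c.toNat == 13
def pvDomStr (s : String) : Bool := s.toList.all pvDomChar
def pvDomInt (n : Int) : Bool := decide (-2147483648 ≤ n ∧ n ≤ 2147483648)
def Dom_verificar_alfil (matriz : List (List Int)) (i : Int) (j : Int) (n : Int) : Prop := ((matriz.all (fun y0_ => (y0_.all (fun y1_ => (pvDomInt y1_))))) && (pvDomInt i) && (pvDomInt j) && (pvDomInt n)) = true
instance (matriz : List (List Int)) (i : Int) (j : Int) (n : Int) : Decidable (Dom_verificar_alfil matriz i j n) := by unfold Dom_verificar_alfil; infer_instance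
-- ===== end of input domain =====

-- B replaces A's four guarded directional ray-walks by a plain full-board scan with the
-- algebraic diagonal test |a-i| = |b-j| (simpler: no directional index, no bounds guards).


-- matriz[a][b] as Python computes it (none = IndexError; negative index from the end)
def pvCell (matriz : List (List Int)) (a b : Int) : Option Int :=
  (PySem.List.pyGet? matriz a).bind (fun row => PySem.List.pyGet? row b)

-- ===== PORT A =====
-- the 'for k in range(n)' loop with its four guarded early returns
def pvLoopA (matriz : List (List Int)) (i j n : Int) : List Int → Bool
  | [] => true
  | k :: ks =>
    if i + k < n ∧ j + k < n ∧ pvCell matriz (i+k) (j+k) = some 1 then false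
    else if i - k ≥ 0 ∧ j - k ≥ 0 ∧ pvCell matriz (i-k) (j-k) = some 1 then false
    else if i + k < n ∧ j - k ≥ 0 ∧ pvCell matriz (i+k) (j-k) = some 1 then false
    else if i - k ≥ 0 ∧ j + k < n ∧ pvCell matriz (i-k) (j+k) = some 1 then false
    else pvLoopA matriz i j n ks

def verificar_alfil (matriz : List (List Int)) (i : Int) (j : Int) (n : Int) : Bool :=
  pvLoopA matriz i j n (PySem.List.pyRange 0 n 1)

-- ===== PORT B =====
-- inner 'for b in range(n)' loop
def pvRowB (matriz : List (List Int)) (i j a : Int) : List Int → Bool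
  | [] => true
  | b :: bs =>
    if |a - i| = |b - j| ∧ pvCell matriz a b = some 1 then false
    else pvRowB matriz i j a bs

-- outer 'for a in range(n)' loop
def pvRowsB (matriz : List (List Int)) (i j n : Int) : List Int → Bool
  | [] => true
  | a :: as_ => pvRowB matriz i j a (PySem.List.pyRange 0 n 1) && pvRowsB matriz i j n as_

def verificar_alfil_alt (matriz : List (List Int)) (i : Int) (j : Int) (n : Int) : Bool :=
  pvRowsB matriz i j n (PySem.List.pyRange 0 n 1)

-- ===== PRECONDITION & SPEC =====
-- Pre_ is the function's natural domain: either a trivial board (n ≤ 0, empty loop) or the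
-- bishop on the board (0 ≤ i,j < n) with at least n rows of length ≥ n each. Outside it
-- Python A either raises IndexError (board smaller than n) or silently reads wrapped
-- rows/columns through negative indexing — an artefact of A's implementation (see cites).
def Pre_verificar_alfil (matriz : List (List Int)) (i : Int) (j : Int) (n : Int) : Prop :=
  n ≤ 0 ∨ (0 ≤ i ∧ i < n ∧ 0 ≤ j ∧ j < n ∧ n ≤ (matriz.length : Int) ∧
    ∀ r ∈ matriz.take n.toNat, n ≤ (r.length : Int))
instance (matriz : List (List Int)) (i : Int) (j : Int) (n : Int) : Decidable (Pre_verificar_alfil matriz i j n) := by unfold Pre_verificar_alfil; infer_instance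

def pvWitness_verificar_alfil : List (List Int) × Int × Int × Int := ([[0, 0], [1, 0]], 0, 0, 2)

def Spec_verificar_alfil (matriz : List (List Int)) (i : Int) (j : Int) (n : Int) (out : Bool) : Prop := out = verificar_alfil_alt matriz i j n
instance (matriz : List (List Int)) (i : Int) (j : Int) (n : Int) (out : Bool) : Decidable (Spec_verificar_alfil matriz i j n out) := by unfold Spec_verificar_alfil; infer_instance

-- ===== CLAIM (what is proved, stated in full; the proofs are below) =====
def Claim_equal_verificar_alfil : Prop := ∀ (matriz : List (List Int)) (i : Int) (j : Int) (n : Int), Dom_verificar_alfil matriz i j n → Pre_verificar_alfil matriz i j n → Spec_verificar_alfil matriz i j n (verificar_alfil matriz i j n)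

-- ===== LEMMAS AND PROOFS =====

theorem pvLoopA_true_iff (m : List (List Int)) (i j n : Int) (ks : List Int) :
    pvLoopA m i j n ks = true ↔ ∀ k ∈ ks,
      ¬(i + k < n ∧ j + k < n ∧ pvCell m (i+k) (j+k) = some 1) ∧
      ¬(i - k ≥ 0 ∧ j - k ≥ 0 ∧ pvCell m (i-k) (j-k) = some 1) ∧
      ¬(i + k < n ∧ j - k ≥ 0 ∧ pvCell m (i+k) (j-k) = some 1) ∧
      ¬(i - k ≥ 0 ∧ j + k < n ∧ pvCell m (i-k) (j+k) = some 1) := by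
  induction ks with
  | nil => simp [pvLoopA]
  | cons k ks ih =>
    simp only [pvLoopA, List.mem_cons]
    split_ifs with h1 h2 h3 h4 <;> simp_all

theorem pvRowB_true_iff (m : List (List Int)) (i j a : Int) (bs : List Int) :
    pvRowB m i j a bs = true ↔ ∀ b ∈ bs, ¬(|a - i| = |b - j| ∧ pvCell m a b = some 1) := by
  induction bs with
  | nil => simp [pvRowB]
  | cons b bs ih =>
    simp only [pvRowB, List.mem_cons]
    split_ifs with h <;> simp_all

theorem pvRowsB_true_iff (m : List (List Int)) (i j n : Int) (as_ : List Int) :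
    pvRowsB m i j n as_ = true ↔
      ∀ a ∈ as_, ∀ b ∈ PySem.List.pyRange 0 n 1, ¬(|a - i| = |b - j| ∧ pvCell m a b = some 1) := by
  induction as_ with
  | nil => simp [pvRowsB]
  | cons a as_ ih =>
    simp only [pvRowsB, Bool.and_eq_true, ih, pvRowB_true_iff, List.mem_cons]
    constructor
    · rintro ⟨h1, h2⟩ x hx
      rcases hx with rfl | hx
      · exact h1
      · exact h2 x hx
    · intro h
      exact ⟨h a (Or.inl rfl), fun x hx => h x (Or.inr hx)⟩

theorem verificar_alfil_spec : Claim_equal_verificar_alfil := by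
  intro matriz i j n _hDom hPre
  unfold Spec_verificar_alfil verificar_alfil verificar_alfil_alt
  rcases hPre with hn | ⟨hi0, hin, hj0, hjn, _hlen, _hrows⟩
  · rw [PySem.List.pyRange_one_eq_nil (by omega)]
    simp [pvLoopA, pvRowsB]
  rw [Bool.eq_iff_iff, pvLoopA_true_iff, pvRowsB_true_iff]
  simp only [PySem.List.mem_pyRange_one]
  constructor
  · -- A's ray conditions imply B's full-scan condition
    rintro hA a ⟨ha0, han⟩ b ⟨hb0, hbn⟩ ⟨habs, hcell⟩
    have hk0 : (0:Int) ≤ |a - i| := abs_nonneg _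
    have hkn : |a - i| < n := by rcases abs_cases (a - i) with ⟨h, _⟩ | ⟨h, _⟩ <;> omega
    obtain ⟨hA1, hA2, hA3, hA4⟩ := hA |a - i| ⟨hk0, hkn⟩
    rcases abs_cases (a - i) with ⟨ha, _⟩ | ⟨ha, _⟩ <;>
      rcases abs_cases (b - j) with ⟨hb, _⟩ | ⟨hb, _⟩
    · exact hA1 ⟨by omega, by omega, by rw [show i + |a-i| = a by omega, show j + |a-i| = b by omega]; exact hcell⟩
    · exact hA3 ⟨by omega, by omega, by rw [show i + |a-i| = a by omega, show j - |a-i| = b by omega]; exact hcell⟩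
    · exact hA4 ⟨by omega, by omega, by rw [show i - |a-i| = a by omega, show j + |a-i| = b by omega]; exact hcell⟩
    · exact hA2 ⟨by omega, by omega, by rw [show i - |a-i| = a by omega, show j - |a-i| = b by omega]; exact hcell⟩
  · -- B's full-scan condition implies each of A's four ray conditions
    rintro hB k ⟨hk0, hkn⟩
    refine ⟨?_, ?_, ?_, ?_⟩
    · rintro ⟨g1, g2, hc⟩
      exact hB (i + k) ⟨by omega, g1⟩ (j + k) ⟨by omega, g2⟩
        ⟨by rw [show i + k - i = k by ring, show j + k - j = k by ring], hc⟩
    · rintro ⟨g1, g2, hc⟩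
      exact hB (i - k) ⟨g1, by omega⟩ (j - k) ⟨g2, by omega⟩
        ⟨by rw [show i - k - i = -k by ring, show j - k - j = -k by ring], hc⟩
    · rintro ⟨g1, g2, hc⟩
      refine hB (i + k) ⟨by omega, g1⟩ (j - k) ⟨g2, by omega⟩ ⟨?_, hc⟩
      rw [show i + k - i = k by ring, show j - k - j = -k by ring, abs_neg]
    · rintro ⟨g1, g2, hc⟩
      refine hB (i - k) ⟨g1, by omega⟩ (j + k) ⟨by omega, g2⟩ ⟨?_, hc⟩
      rw [show i - k - i = -k by ring, show j + k - j = k by ring, abs_neg]
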